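-- pv_equiv track=rewrite | github.com/allen791210/MITx-6.00.1x-Introduction-to-Computer-Science-and-Programming-Using-Python | hw1_3.py | item_order
-- ===== SOURCE A (Python) =====
-- def item_order(order):
--     numSalad = 0
--     numHamburger = 0
--     numWater = 0
--     s= order.split()
--
--     for i in s:
--         if i == 'salad':
--             numSalad += 1
--
--         elif i == 'hamburger':
--             numHamburger += 1
--
--         elif i == 'water':
--             numWater += 1
--
--     result = "salad:"+ str(numSalad) + " hamburger:"+ str(numHamburger)+ " water:"+ str(numWater)
--     return result
-- ===== SOURCE B (Python) =====
-- def _rle(ts):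
--     # run-length encode a list: maximal runs of equal adjacent elements
--     if not ts:
--         return []
--     x = ts[0]
--     run = 1
--     rest = ts[1:]
--     while rest and rest[0] == x:
--         run += 1
--         rest = rest[1:]
--     return [(x, run)] + _rle(rest)
--
--
-- def _total(runs, w):
--     return sum(k for t, k in runs if t == w)
--
--
-- def item_order(order):
--     toks = sorted(order.split())
--     runs = _rle(toks)
--     return ("salad:" + str(_total(runs, 'salad'))
--             + " hamburger:" + str(_total(runs, 'hamburger'))
--             + " water:" + str(_total(runs, 'water')))
-- ===== Notes on version B (the rewrite author's own statement) =====
-- stated objective: alternative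
-- what changed: Replaces A's single if/elif tallying pass with sort-then-scan: sort the tokens, run-length encode the sorted list into (token, run-length) pairs, and read each of the three counts off by summing the matching run lengths.
import Mathlib
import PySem

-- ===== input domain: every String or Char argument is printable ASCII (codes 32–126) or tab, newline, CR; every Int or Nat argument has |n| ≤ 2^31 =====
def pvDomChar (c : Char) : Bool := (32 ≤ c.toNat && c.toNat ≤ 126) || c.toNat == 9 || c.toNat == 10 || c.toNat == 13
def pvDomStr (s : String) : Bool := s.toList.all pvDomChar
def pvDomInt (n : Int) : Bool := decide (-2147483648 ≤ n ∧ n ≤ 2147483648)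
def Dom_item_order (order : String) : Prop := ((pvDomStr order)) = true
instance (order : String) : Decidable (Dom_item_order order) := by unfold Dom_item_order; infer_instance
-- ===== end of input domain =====

-- B replaces A's single if/elif tallying pass with sort-then-scan: sort the tokens,
-- run-length encode the sorted list, read the three counts off the runs (alternative; same result).

-- ===== PORT A =====
-- loop body of A's for-loop (the if/elif chain updating the three counters)
def itemStep (acc : Int × Int × Int) (i : String) : Int × Int × Int :=
  if i == "salad" then (acc.1 + 1, acc.2.1, acc.2.2)
  else if i == "hamburger" then (acc.1, acc.2.1 + 1, acc.2.2)
  else if i == "water" then (acc.1, acc.2.1, acc.2.2 + 1)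
  else acc

def item_order (order : String) : String :=
  let s := PySem.Str.split₀ order
  let acc := s.foldl itemStep (0, 0, 0)
  PySem.Str.join "" ["salad:", PySem.Int.toStr acc.1, " hamburger:", PySem.Int.toStr acc.2.1,
    " water:", PySem.Int.toStr acc.2.2]

-- ===== PORT B =====
-- _rle: run-length encode (the while loop consuming the run of ts[0] is takeWhile/dropWhile)
def rleRuns : List String → List (String × Nat)
  | [] => []
  | x :: xs =>
    (x, (xs.takeWhile (· == x)).length + 1) :: rleRuns (xs.dropWhile (· == x))
termination_by l => l.length
decreasing_by
  exact Nat.lt_succ_of_le (List.length_dropWhile_le _ xs)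

-- _total: sum of the run lengths whose token equals w
def runTotal (runs : List (String × Nat)) (w : String) : Nat :=
  ((runs.filter (fun p => p.1 == w)).map (fun p => p.2)).sum

def item_order_alt (order : String) : String :=
  let toks := PySem.List.sorted (PySem.Str.split₀ order) (fun x => x) false
  let runs := rleRuns toks
  PySem.Str.join "" ["salad:", PySem.Int.toStr (runTotal runs "salad" : Int),
    " hamburger:", PySem.Int.toStr (runTotal runs "hamburger" : Int),
    " water:", PySem.Int.toStr (runTotal runs "water" : Int)]

-- ===== PRECONDITION & SPEC =====
def Spec_item_order (order : String) (out : String) : Prop := out = item_order_alt order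
instance (order : String) (out : String) : Decidable (Spec_item_order order out) := by unfold Spec_item_order; infer_instance

-- ===== CLAIM (what is proved, stated in full; the proofs are below) =====
def Claim_equal_item_order : Prop := ∀ (order : String), Dom_item_order order → Spec_item_order order (item_order order)

-- ===== LEMMAS AND PROOFS =====

-- A's triple-accumulator counting loop computes the three independent counts.
theorem item_order_fold_eq (l : List String) (a b c : Int) :
    l.foldl itemStep (a, b, c)
    = (a + l.count "salad", b + l.count "hamburger", c + l.count "water") := by
  induction l generalizing a b c with
  | nil => simp
  | cons x xs ih =>
    rw [List.foldl_cons]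
    by_cases hs : x = "salad"
    · subst hs
      rw [show itemStep (a, b, c) "salad" = (a + 1, b, c) from rfl, ih]
      simp; ring
    · by_cases hh : x = "hamburger"
      · subst hh
        rw [show itemStep (a, b, c) "hamburger" = (a, b + 1, c) from rfl, ih]
        simp [hs]; ring
      · by_cases hw : x = "water"
        · subst hw
          rw [show itemStep (a, b, c) "water" = (a, b, c + 1) from rfl, ih]
          simp [hs, hh]; ring
        · rw [show itemStep (a, b, c) x = (a, b, c) by simp [itemStep, hs, hh, hw], ih]
          simp [hs, hh, hw]

-- summing the run lengths labelled w in the run-length encoding recovers the count of w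
theorem runTotal_rleRuns (l : List String) (w : String) :
    runTotal (rleRuns l) w = l.count w := by
  induction l using rleRuns.induct with
  | case1 => simp [rleRuns, runTotal]
  | case2 x xs ih =>
    have hxs : xs.count w
        = (xs.takeWhile (· == x)).count w + (xs.dropWhile (· == x)).count w := by
      conv_lhs => rw [← List.takeWhile_append_dropWhile (p := (· == x)) (l := xs)]
      exact List.count_append ..
    have htw : (xs.takeWhile (· == x)).count w
        = if w = x then (xs.takeWhile (· == x)).length else 0 := by
      by_cases h : w = x
      · subst h
        rw [if_pos rfl]
        refine List.count_eq_length.mpr ?_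
        intro b hb
        have hbx := List.mem_takeWhile_imp hb
        simp only [beq_iff_eq] at hbx
        exact hbx.symm
      · rw [if_neg h]
        refine List.count_eq_zero.mpr ?_
        intro hmem
        have hbx := List.mem_takeWhile_imp hmem
        simp only [beq_iff_eq] at hbx
        exact h hbx
    simp only [runTotal] at ih
    rw [rleRuns]
    by_cases hwx : w = x
    · subst hwx
      rw [if_pos rfl] at htw
      simp [runTotal, hxs, htw, ih]
      omega
    · have hxw : (x == w) = false := beq_false_of_ne (Ne.symm hwx)
      rw [if_neg hwx] at htw
      simp [runTotal, hxw, ih, Ne.symm hwx, hxs, htw]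

-- sorting does not change counts (sorted is a permutation)
theorem count_sorted (l : List String) (w : String) :
    (PySem.List.sorted l (fun x => x) false).count w = l.count w :=
  (PySem.List.sorted_perm l (fun x => x) false).count_eq w

-- ===== VERDICT (by name: the statement is the Claim_ definition above) =====
theorem item_order_spec : Claim_equal_item_order := by
  intro order _
  unfold Spec_item_order item_order item_order_alt
  simp only [item_order_fold_eq, runTotal_rleRuns, count_sorted]
  norm_num
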